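-- pv_equiv track=rewrite | github.com/mnot/rfc-http-validate | sf-rfc-validate.py | combine_headers
-- ===== SOURCE A (Python) =====
-- def combine_headers(content):
--     headers = {}
--     prev_name = None
--     for line in content.split("\n"):
--         if not line:
--             continue
--         if line[0] == " ":
--             if prev_name:
--                 headers[prev_name] += f" {line.strip()}"
--                 continue
--             raise ValueError("First line starts with whitespace")
--         try:
--             name, value = line.split(":", 1)
--         except ValueError:
--             raise ValueError("Non-field line in content")
--         name = name.strip().lower()
--         value = value.strip()
--         if name in headers:
--             headers[name] += f", {value}"
--         else:
--             headers[name] = value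
--         prev_name = name
--     return headers
-- ===== SOURCE B (Python) =====
-- def combine_headers(content):
--     # pass 1: unfold continuation lines into a flat list of (name, value) fields
--     fields = []
--     for line in content.split("\n"):
--         if not line:
--             continue
--         if line[0] == " ":
--             if not fields:
--                 raise ValueError("First line starts with whitespace")
--             last_name, last_value = fields[-1]
--             fields[-1] = (last_name, last_value + " " + line.strip())
--             continue
--         parts = line.split(":", 1)
--         if len(parts) == 1:
--             raise ValueError("Non-field line in content")
--         name, value = parts
--         fields.append((name.strip().lower(), value.strip()))
--     # pass 2: merge duplicate field names in order of first appearance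
--     headers = {}
--     for name, value in fields:
--         if name in headers:
--             headers[name] = headers[name] + ", " + value
--         else:
--             headers[name] = value
--     return headers
-- ===== Notes on version B (the rewrite author's own statement) =====
-- stated objective: alternative
-- what changed: A folds everything in one stateful pass over a dict plus a prev_name pointer; B first unfolds continuation lines into a flat list of (name, value) fields and then merges duplicate names into the dict in a second pass.
import Mathlib
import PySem

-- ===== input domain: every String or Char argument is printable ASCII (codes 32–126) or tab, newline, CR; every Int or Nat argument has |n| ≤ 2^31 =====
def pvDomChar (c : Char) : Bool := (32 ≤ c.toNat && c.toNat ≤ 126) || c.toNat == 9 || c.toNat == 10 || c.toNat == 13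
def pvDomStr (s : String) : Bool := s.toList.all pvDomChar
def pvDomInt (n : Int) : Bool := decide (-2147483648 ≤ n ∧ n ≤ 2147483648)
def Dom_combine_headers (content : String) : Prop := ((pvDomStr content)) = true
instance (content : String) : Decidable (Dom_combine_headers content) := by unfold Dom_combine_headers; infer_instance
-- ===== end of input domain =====

-- B replaces A's single stateful pass (dict + prev_name pointer) by two passes: unfold
-- continuations into a list of (name, value) fields, then merge duplicate names (objective:
-- alternative decomposition, same cost). Proved equal on Pre_ = exactly the inputs where
-- the Python A returns (raises excluded).

-- ===== PORT A =====
-- one loop step of A; state none = a ValueError was raised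
def stepA (st : Option (PySem.Dict String String × Option String)) (line : String) :
    Option (PySem.Dict String String × Option String) :=
  match st with
  | none => none
  | some (headers, prev_name) =>
    if line = "" then some (headers, prev_name)          -- `if not line: continue`
    else if PySem.Str.pyGet? line 0 = some ' ' then      -- `line[0] == " "`
      match prev_name with
      | some pn =>
        if pn ≠ "" then
          -- headers[prev_name] += f" {line.strip()}"  (pn is always a present key here)
          match headers.get? pn with
          | some v => some (headers.insert pn (v ++ " " ++ PySem.Str.strip line), prev_name)
          | none => none
        else none                                        -- raise: "First line starts with whitespace"
      | none => none                                     -- raise: "First line starts with whitespace"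
    else
      match (PySem.Str.splitMax? line ":" 1).getD [] with  -- name, value = line.split(":", 1)
      | [name0, value0] =>
        let name := PySem.Str.lower (PySem.Str.strip name0)
        let value := PySem.Str.strip value0
        match headers.get? name with                     -- `if name in headers`
        | some w => some (headers.insert name (w ++ ", " ++ value), some name)
        | none => some (headers.insert name value, some name)
      | _ => none                                        -- raise: "Non-field line in content"

def combine_headers (content : String) : List (String × String) :=
  match (((PySem.Str.split? content "\n").getD []).foldl stepA
      (some (PySem.Dict.empty, none))) with
  | some (headers, _) => headers.items
  | none => []                                           -- A raises here; excluded by Pre_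

-- ===== PORT B =====
-- pass 1 step: unfold continuation lines into a list of (name, value) fields
def stepB (st : Option (List (String × String))) (line : String) :
    Option (List (String × String)) :=
  match st with
  | none => none
  | some fields =>
    if line = "" then some fields
    else if PySem.Str.pyGet? line 0 = some ' ' then
      match fields.getLast? with                         -- `fields[-1]`
      | none => none                                     -- raise: "First line starts with whitespace"
      | some (n, v) => some (fields.dropLast ++ [(n, v ++ " " ++ PySem.Str.strip line)])
    else
      match (PySem.Str.splitMax? line ":" 1).getD [] with
      | [name0, value0] =>
        some (fields ++ [(PySem.Str.lower (PySem.Str.strip name0), PySem.Str.strip value0)])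
      | _ => none                                        -- raise: "Non-field line in content"

-- pass 2 step: merge one field into the dict
def mergeStep (d : PySem.Dict String String) (p : String × String) : PySem.Dict String String :=
  match d.get? p.1 with
  | some w => d.insert p.1 (w ++ ", " ++ p.2)
  | none => d.insert p.1 p.2

def combine_headers_alt (content : String) : List (String × String) :=
  match (((PySem.Str.split? content "\n").getD []).foldl stepB (some [])) with
  | some fields => (fields.foldl mergeStep PySem.Dict.empty).items
  | none => []                                           -- B raises here; excluded by Pre_

-- ===== PRECONDITION & SPEC =====
-- the non-blank lines, in order
def pvLines (content : String) : List String :=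
  ((PySem.Str.split? content "\n").getD []).filter (fun l => l ≠ "")
-- a continuation line (starts with a space)
abbrev pvCont (l : String) : Prop := PySem.Str.pyGet? l 0 = some ' '
def pvParts (l : String) : List String := (PySem.Str.splitMax? l ":" 1).getD []
-- a field line: splitting on the first colon yields two parts, i.e. the line contains a colon
abbrev pvFieldOk (l : String) : Prop := (pvParts l).length = 2
-- the lower-cased stripped field name of a field line
def pvName (l : String) : String := PySem.Str.lower (PySem.Str.strip ((pvParts l).getD 0 ""))
abbrev pvNameOk (l : String) : Prop := pvFieldOk l ∧ pvName l ≠ ""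

-- Pre_ = exactly the inputs on which the Python A returns (no ValueError): every non-blank,
-- non-continuation line contains a colon, and every continuation line is preceded by a field line
-- whose (stripped) name is non-empty, with only continuation lines in between.
def Pre_combine_headers (content : String) : Prop :=
  ∀ i, i < (pvLines content).length →
    (pvCont ((pvLines content).getD i "") →
      ∃ j, j < i ∧ ¬ pvCont ((pvLines content).getD j "") ∧ pvNameOk ((pvLines content).getD j "") ∧
        ∀ k, k < i → j < k → pvCont ((pvLines content).getD k "")) ∧
    (¬ pvCont ((pvLines content).getD i "") → pvFieldOk ((pvLines content).getD i ""))
instance (content : String) : Decidable (Pre_combine_headers content) := by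
  unfold Pre_combine_headers
  exact @Nat.decidableBallLT (pvLines content).length (fun i _ =>
    (pvCont ((pvLines content).getD i "") →
      ∃ j, j < i ∧ ¬ pvCont ((pvLines content).getD j "") ∧ pvNameOk ((pvLines content).getD j "") ∧
        ∀ k, k < i → j < k → pvCont ((pvLines content).getD k "")) ∧
    (¬ pvCont ((pvLines content).getD i "") → pvFieldOk ((pvLines content).getD i "")))
    (fun i _ => inferInstance)

def pvWitness_combine_headers : String := "Host: a\nX-Y: b\n c\nhost: d"

def Spec_combine_headers (content : String) (out : List (String × String)) : Prop := out = combine_headers_alt content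
instance (content : String) (out : List (String × String)) : Decidable (Spec_combine_headers content out) := by unfold Spec_combine_headers; infer_instance

-- ===== CLAIM (what is proved, stated in full; the proofs are below) =====
def Claim_equal_combine_headers : Prop := ∀ (content : String), Dom_combine_headers content → Pre_combine_headers content → Spec_combine_headers content (combine_headers content)

-- ===== LEMMAS AND PROOFS =====

-- recursive well-formedness of a (blank-free) line list, given the name of the last field so far
def OkR : Option String → List String → Prop
  | _, [] => True
  | c, l :: ls =>
    if pvCont l then (∃ s, c = some s ∧ s ≠ "") ∧ OkR c ls
    else pvFieldOk l ∧ OkR (some (pvName l)) ls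

theorem append_assoc_str (a b c : String) : a ++ b ++ c = a ++ (b ++ c) :=
  String.append_assoc

-- blank lines are skipped by both folds
theorem foldA_filter (ls : List String) (st : Option (PySem.Dict String String × Option String)) :
    ls.foldl stepA st = (ls.filter (fun l => l ≠ "")).foldl stepA st := by
  induction ls generalizing st with
  | nil => rfl
  | cons l ls ih =>
    by_cases h : l = ""
    · subst h
      have hst : stepA st "" = st := by
        cases st with
        | none => rfl
        | some p => rcases p with ⟨d, pn⟩; simp [stepA]
      simp [List.foldl_cons, hst, ih]
    · simp [List.foldl_cons, h, ih]

theorem foldB_filter (ls : List String) (st : Option (List (String × String))) :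
    ls.foldl stepB st = (ls.filter (fun l => l ≠ "")).foldl stepB st := by
  induction ls generalizing st with
  | nil => rfl
  | cons l ls ih =>
    by_cases h : l = ""
    · subst h
      have hst : stepB st "" = st := by
        cases st with
        | none => rfl
        | some fs => simp [stepB]
      simp [List.foldl_cons, hst, ih]
    · simp [List.foldl_cons, h, ih]

-- bridge from the indexed precondition to the recursive one
theorem bridge (ls : List String) (c : Option String)
    (h : ∀ i, i < ls.length →
      (pvCont (ls.getD i "") →
        (∃ j, j < i ∧ ¬ pvCont (ls.getD j "") ∧ pvNameOk (ls.getD j "") ∧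
          ∀ k, k < i → j < k → pvCont (ls.getD k "")) ∨
        ((∀ j, j < i → pvCont (ls.getD j "")) ∧ ∃ s, c = some s ∧ s ≠ "")) ∧
      (¬ pvCont (ls.getD i "") → pvFieldOk (ls.getD i ""))) :
    OkR c ls := by
  induction ls generalizing c with
  | nil => trivial
  | cons l ls ih =>
    unfold OkR
    by_cases hc : pvCont l
    · rw [if_pos hc]
      refine ⟨?_, ?_⟩
      · have h0 := (h 0 (by simp)).1 (by simpa using hc)
        rcases h0 with ⟨j, hj, _⟩ | ⟨_, hgood⟩
        · omega
        · exact hgood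
      · apply ih
        intro i hi
        have hi1 := h (i+1) (by simpa using hi)
        refine ⟨?_, ?_⟩
        · intro hcont
          rcases hi1.1 (by simpa using hcont) with ⟨j, hj, hjnc, hjok, hbet⟩ | ⟨hall, hgood⟩
          · cases j with
            | zero => exact absurd hc (by simpa using hjnc)
            | succ j' =>
              exact Or.inl ⟨j', by omega, by simpa using hjnc, by simpa using hjok,
                fun k hk1 hk2 => by simpa using hbet (k+1) (by omega) (by omega)⟩
          · exact Or.inr ⟨fun j hj => by simpa using hall (j+1) (by omega), hgood⟩
        · intro hnc
          exact hi1.2 (by simpa using hnc)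
    · rw [if_neg hc]
      refine ⟨(h 0 (by simp)).2 (by simpa using hc), ?_⟩
      apply ih
      intro i hi
      have hi1 := h (i+1) (by simpa using hi)
      refine ⟨?_, ?_⟩
      · intro hcont
        rcases hi1.1 (by simpa using hcont) with ⟨j, hj, hjnc, hjok, hbet⟩ | ⟨hall, _⟩
        · cases j with
          | zero =>
            refine Or.inr ⟨fun k hk => by simpa using hbet (k+1) (by omega) (by omega), ?_⟩
            exact ⟨pvName l, rfl, (show pvNameOk l by simpa using hjok).2⟩
          | succ j' =>
            exact Or.inl ⟨j', by omega, by simpa using hjnc, by simpa using hjok,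
              fun k hk1 hk2 => by simpa using hbet (k+1) (by omega) (by omega)⟩
        · exact absurd (by simpa using hall 0 (by omega)) hc
      · intro hnc
        exact hi1.2 (by simpa using hnc)

-- extending the value of the last-added field commutes with merging
theorem merge_snoc_extend (fields : List (String × String)) (d : PySem.Dict String String)
    (n v s : String) :
    ∃ w, ((fields ++ [(n, v)]).foldl mergeStep d).get? n = some w ∧
      (fields ++ [(n, v ++ s)]).foldl mergeStep d =
        ((fields ++ [(n, v)]).foldl mergeStep d).insert n (w ++ s) := by
  induction fields generalizing d with
  | nil =>
    simp only [List.nil_append, List.foldl_cons, List.foldl_nil]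
    cases hd : d.get? n with
    | none =>
      refine ⟨v, ?_, ?_⟩
      · simp [mergeStep, hd, PySem.Dict.get?_insert_self]
      · simp [mergeStep, hd, PySem.Dict.insert_insert_self]
    | some u =>
      refine ⟨u ++ ", " ++ v, ?_, ?_⟩
      · simp [mergeStep, hd, PySem.Dict.get?_insert_self]
      · simp [mergeStep, hd, PySem.Dict.insert_insert_self, append_assoc_str]
  | cons p fields ih =>
    simp only [List.cons_append, List.foldl_cons]
    exact ih (mergeStep d p)

-- main simulation: A's state is the merge of B's field list plus the last field name
theorem mainSim (ls : List String) (fields : List (String × String))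
    (hnb : ∀ l ∈ ls, l ≠ "") (hok : OkR ((fields.getLast?).map Prod.fst) ls) :
    ∃ fields', ls.foldl stepB (some fields) = some fields' ∧
      ls.foldl stepA (some (fields.foldl mergeStep PySem.Dict.empty, (fields.getLast?).map Prod.fst)) =
        some (fields'.foldl mergeStep PySem.Dict.empty, (fields'.getLast?).map Prod.fst) := by
  induction ls generalizing fields with
  | nil => exact ⟨fields, rfl, rfl⟩
  | cons l ls ih =>
    have hl : l ≠ "" := hnb l List.mem_cons_self
    have hnb' : ∀ x ∈ ls, x ≠ "" := fun x hx => hnb x (List.mem_cons_of_mem l hx)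
    unfold OkR at hok
    by_cases hc : pvCont l
    · rw [if_pos hc] at hok
      obtain ⟨⟨s, hcs, hs⟩, hok'⟩ := hok
      rcases fields.eq_nil_or_concat with rfl | ⟨f0, p, hfe⟩
      · simp at hcs
      rw [List.concat_eq_append] at hfe
      subst hfe
      rcases p with ⟨n, v⟩
      have hn : n = s := by simpa [List.getLast?_concat] using hcs
      subst hn
      have hcL : PySem.List.pyGet? l.toList 0 = some ' ' := by simpa [pvCont] using hc
      obtain ⟨w, hw, hmerge⟩ := merge_snoc_extend f0 PySem.Dict.empty n v (" " ++ PySem.Str.strip l)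
      have hw' : (mergeStep (List.foldl mergeStep PySem.Dict.empty f0) (n, v)).get? n = some w := by
        simpa [List.foldl_append] using hw
      have hB1 : stepB (some (f0 ++ [(n, v)])) l
          = some (f0 ++ [(n, v ++ " " ++ PySem.Str.strip l)]) := by
        simp [stepB, hl, hcL]
      have hA1 : stepA (some ((f0 ++ [(n, v)]).foldl mergeStep PySem.Dict.empty,
            (((f0 ++ [(n, v)]).getLast?).map Prod.fst))) l
          = some (((f0 ++ [(n, v)]).foldl mergeStep PySem.Dict.empty).insert n
              (w ++ " " ++ PySem.Str.strip l), some n) := by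
        simp [stepA, hl, hcL, hs, hw']
      have hstate : ((f0 ++ [(n, v)]).foldl mergeStep PySem.Dict.empty).insert n
            (w ++ " " ++ PySem.Str.strip l)
          = (f0 ++ [(n, v ++ " " ++ PySem.Str.strip l)]).foldl mergeStep PySem.Dict.empty := by
        rw [append_assoc_str v " " (PySem.Str.strip l), append_assoc_str w " " (PySem.Str.strip l), hmerge]
      obtain ⟨fields', hB, hA⟩ := ih (f0 ++ [(n, v ++ " " ++ PySem.Str.strip l)]) hnb'
        (by simpa [List.getLast?_concat] using hok')
      refine ⟨fields', ?_, ?_⟩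
      · rw [List.foldl_cons, hB1]; exact hB
      · rw [List.foldl_cons, hA1, hstate]
        simpa [List.getLast?_concat] using hA
    · rw [if_neg hc] at hok
      obtain ⟨hfo, hok'⟩ := hok
      obtain ⟨n0, v0, hparts⟩ := List.length_eq_two.mp hfo
      have hcL : ¬ PySem.List.pyGet? l.toList 0 = some ' ' := by simpa [pvCont] using hc
      have hparts' : (PySem.Str.splitMax? l ":" 1).getD [] = [n0, v0] := hparts
      have hname : pvName l = PySem.Str.lower (PySem.Str.strip n0) := by
        simp [pvName, hparts]
      have hB1 : stepB (some fields) l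
          = some (fields ++ [(PySem.Str.lower (PySem.Str.strip n0), PySem.Str.strip v0)]) := by
        simp [stepB, hl, hcL, hparts']
      have hA1 : stepA (some (fields.foldl mergeStep PySem.Dict.empty,
            ((fields.getLast?).map Prod.fst))) l
          = some (mergeStep (fields.foldl mergeStep PySem.Dict.empty)
              (PySem.Str.lower (PySem.Str.strip n0), PySem.Str.strip v0),
              some (PySem.Str.lower (PySem.Str.strip n0))) := by
        simp only [stepA, PySem.Str.pyGet?_eq, if_neg hl, hparts']
        cases hgd : (fields.foldl mergeStep PySem.Dict.empty).get?
            (PySem.Str.lower (PySem.Str.strip n0)) with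
        | none => simp [mergeStep, hgd, hcL]
        | some u => simp [mergeStep, hgd, hcL]
      obtain ⟨fields', hB, hA⟩ := ih
        (fields ++ [(PySem.Str.lower (PySem.Str.strip n0), PySem.Str.strip v0)]) hnb'
        (by simpa [List.getLast?_concat, hname] using hok')
      refine ⟨fields', ?_, ?_⟩
      · rw [List.foldl_cons, hB1]; exact hB
      · rw [List.foldl_cons, hA1]
        have : mergeStep (fields.foldl mergeStep PySem.Dict.empty)
              (PySem.Str.lower (PySem.Str.strip n0), PySem.Str.strip v0)
            = (fields ++ [(PySem.Str.lower (PySem.Str.strip n0), PySem.Str.strip v0)]).foldl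
                mergeStep PySem.Dict.empty := by
          simp [List.foldl_append]
        rw [this]
        simpa [List.getLast?_concat] using hA

-- ===== VERDICT (by name: the statement is the Claim_ definition above) =====
theorem combine_headers_spec : Claim_equal_combine_headers := by
  intro content _ hpre
  unfold Spec_combine_headers combine_headers combine_headers_alt
  rw [foldA_filter, foldB_filter]
  have hnb : ∀ l ∈ pvLines content, l ≠ "" := by
    intro l hl
    have := (List.mem_filter.mp (show l ∈ _ from hl)).2
    simpa using this
  have hok : OkR none (pvLines content) := by
    apply bridge
    intro i hi
    exact ⟨fun hcont => Or.inl ((hpre i hi).1 hcont), (hpre i hi).2⟩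
  obtain ⟨fields', hB, hA⟩ := mainSim (pvLines content) [] hnb (by simpa using hok)
  have hA' : (pvLines content).foldl stepA (some (PySem.Dict.empty, none))
      = some (fields'.foldl mergeStep PySem.Dict.empty, (fields'.getLast?).map Prod.fst) := by
    simpa using hA
  show (match (pvLines content).foldl stepA (some (PySem.Dict.empty, none)) with
      | some (headers, _) => headers.items | none => ([] : List (String × String)))
    = (match (pvLines content).foldl stepB (some []) with
      | some fields => (fields.foldl mergeStep PySem.Dict.empty).items | none => [])
  rw [hA', hB]
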